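-- pv_equiv track=rewrite | github.com/lchryu/bond | 300baicode/hoc/93.py | gtln
-- ===== SOURCE A (Python) =====
-- def gtln (a) :
--     check = False
--     gtln = -1
--     while a > 0 :
--         r = a % 10
--         a //= 10
--         if r > gtln and r % 2 == 1 :
--             gtln = r
--             check = True
--     return gtln , check
-- ===== SOURCE B (Python) =====
-- def _has_digit(a, d):
--     while a > 0:
--         if a % 10 == d:
--             return True
--         a //= 10
--     return False
--
-- def gtln(a):
--     if a <= 0:
--         return (-1, False)
--     for d in (9, 7, 5, 3, 1):
--         if _has_digit(a, d):
--             return (d, True)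
--     return (-1, False)
-- ===== Notes on version B (the rewrite author's own statement) =====
-- stated objective: alternative
-- what changed: Instead of peeling every digit and maintaining a running max-odd accumulator with a flag, B probes the five odd digit candidates in descending order and returns the first one that occurs among a's digits.
import Mathlib
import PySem

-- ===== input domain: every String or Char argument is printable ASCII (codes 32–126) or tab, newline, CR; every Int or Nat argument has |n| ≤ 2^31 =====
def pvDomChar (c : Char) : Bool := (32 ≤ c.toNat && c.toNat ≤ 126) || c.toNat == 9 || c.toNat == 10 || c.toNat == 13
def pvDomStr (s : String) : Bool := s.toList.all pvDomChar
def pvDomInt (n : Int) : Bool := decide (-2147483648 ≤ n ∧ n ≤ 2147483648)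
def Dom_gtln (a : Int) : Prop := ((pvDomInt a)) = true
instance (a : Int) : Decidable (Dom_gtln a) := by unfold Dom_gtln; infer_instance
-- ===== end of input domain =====

-- B probes the odd digit candidates 9,7,5,3,1 in descending order instead of
-- peeling every digit while maintaining a running max-odd accumulator (objective: alternative).

-- termination helper shared by both ports (cited in decreasing_by)
theorem pvDiv10_toNat_lt (a : Int) (h : 0 < a) :
    (PySem.Int.floordiv a 10).toNat < a.toNat := by
  have h1 : PySem.Int.floordiv a 10 < a :=
    (PySem.Int.floordiv_lt_iff_lt_mul (by omega)).2 (by nlinarith)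
  have h2 : 0 ≤ PySem.Int.floordiv a 10 := by
    rw [PySem.Int.floordiv_eq_ediv_of_pos (by omega)]
    exact Int.ediv_nonneg (by omega) (by omega)
  omega

-- ===== PORT A =====
def gtlnLoop (a g : Int) (c : Bool) : Int × Bool :=
  if h : a > 0 then
    let r := PySem.Int.mod a 10
    if r > g ∧ PySem.Int.mod r 2 = 1 then
      gtlnLoop (PySem.Int.floordiv a 10) r true
    else
      gtlnLoop (PySem.Int.floordiv a 10) g c
  else (g, c)
termination_by a.toNat
decreasing_by all_goals exact pvDiv10_toNat_lt a h

def gtln (a : Int) : Int × Bool := gtlnLoop a (-1) false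

-- ===== PORT B =====
def hasDigit (a d : Int) : Bool :=
  if h : a > 0 then
    if PySem.Int.mod a 10 = d then true
    else hasDigit (PySem.Int.floordiv a 10) d
  else false
termination_by a.toNat
decreasing_by exact pvDiv10_toNat_lt a h

def gtln_alt (a : Int) : Int × Bool :=
  if a ≤ 0 then (-1, false)
  else
    match ([9, 7, 5, 3, 1] : List Int).find? (fun d => hasDigit a d) with
    | some d => (d, true)
    | none => (-1, false)

-- ===== PRECONDITION & SPEC =====
def Spec_gtln (a : Int) (out : Int × Bool) : Prop := out = gtln_alt a
instance (a : Int) (out : Int × Bool) : Decidable (Spec_gtln a out) := by unfold Spec_gtln; infer_instance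

-- ===== CLAIM (what is proved, stated in full; the proofs are below) =====
def Claim_equal_gtln : Prop := ∀ (a : Int), Dom_gtln a → Spec_gtln a (gtln a)

-- ===== LEMMAS AND PROOFS =====

-- the digit list a's loops peel, most significant last
def pvDigits (a : Int) : List Int :=
  if 0 < a then PySem.Int.mod a 10 :: pvDigits (PySem.Int.floordiv a 10) else []
termination_by a.toNat
decreasing_by exact pvDiv10_toNat_lt a (by omega)

def pvStep (p : Int × Bool) (r : Int) : Int × Bool :=
  if r > p.1 ∧ PySem.Int.mod r 2 = 1 then (r, true) else p

theorem pvDigits_bounds (a : Int) : ∀ r ∈ pvDigits a, 0 ≤ r ∧ r < 10 := by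
  induction a using pvDigits.induct with
  | case1 a h ih =>
    rw [pvDigits, if_pos h]
    intro r hr
    rcases List.mem_cons.1 hr with h1 | h1
    · subst h1
      exact ⟨PySem.Int.mod_nonneg a (by omega), PySem.Int.mod_lt a (by omega)⟩
    · exact ih r h1
  | case2 a h => rw [pvDigits, if_neg h]; simp

theorem gtlnLoop_eq_foldl (a g : Int) (c : Bool) :
    gtlnLoop a g c = (pvDigits a).foldl pvStep (g, c) := by
  induction a, g, c using gtlnLoop.induct with
  | case1 a g c h r hc ih =>
    rw [gtlnLoop, dif_pos h]
    dsimp only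
    rw [if_pos hc, pvDigits, if_pos h, List.foldl_cons, ih]
    have : pvStep (g, c) (PySem.Int.mod a 10) = (PySem.Int.mod a 10, true) := by
      unfold pvStep; rw [if_pos hc]
    rw [this]
  | case2 a g c h r hc ih =>
    rw [gtlnLoop, dif_pos h]
    dsimp only
    rw [if_neg hc, pvDigits, if_pos h, List.foldl_cons, ih]
    have : pvStep (g, c) (PySem.Int.mod a 10) = (g, c) := by
      unfold pvStep; rw [if_neg hc]
    rw [this]
  | case3 a g c h =>
    rw [gtlnLoop, dif_neg h, pvDigits, if_neg (by omega)]
    simp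

theorem hasDigit_eq_mem (a d : Int) : hasDigit a d = decide (d ∈ pvDigits a) := by
  induction a using hasDigit.induct d with
  | case1 a h hd =>
    rw [hasDigit, dif_pos h, if_pos hd, pvDigits, if_pos h]
    exact (decide_eq_true (List.mem_cons.2 (Or.inl hd.symm))).symm
  | case2 a h hd ih =>
    rw [hasDigit, dif_pos h, if_neg hd, pvDigits, if_pos h, ih]
    simp only [List.mem_cons, decide_eq_decide]
    constructor
    · exact Or.inr
    · rintro (h' | h')
      · exact absurd h'.symm hd
      · exact h'
  | case3 a h =>
    rw [hasDigit, dif_neg h, pvDigits, if_neg h]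
    simp

theorem foldl_fst_ge (l : List Int) (g : Int) (c : Bool) :
    g ≤ (l.foldl pvStep (g, c)).1 := by
  induction l generalizing g c with
  | nil => simp
  | cons r t ih =>
    rw [List.foldl_cons]
    unfold pvStep
    split_ifs with h
    · exact le_of_lt (lt_of_lt_of_le h.1 (ih r true))
    · exact ih g c

theorem foldl_fst_ge_odd (l : List Int) (g : Int) (c : Bool) :
    ∀ r ∈ l, PySem.Int.mod r 2 = 1 → r ≤ (l.foldl pvStep (g, c)).1 := by
  induction l generalizing g c with
  | nil => simp
  | cons x t ih =>
    intro r hr hodd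
    rw [List.foldl_cons]
    rcases List.mem_cons.1 hr with h1 | h1
    · subst h1
      unfold pvStep
      split_ifs with h
      · exact foldl_fst_ge t r true
      · have : ¬ r > g := fun hg => h ⟨hg, hodd⟩
        exact le_trans (by omega) (foldl_fst_ge t g c)
    · unfold pvStep
      split_ifs with h
      · exact ih _ _ r h1 hodd
      · exact ih _ _ r h1 hodd

theorem foldl_cases (l : List Int) (g : Int) (c : Bool) :
    l.foldl pvStep (g, c) = (g, c) ∨
      ((l.foldl pvStep (g, c)).1 ∈ l ∧
       PySem.Int.mod (l.foldl pvStep (g, c)).1 2 = 1 ∧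
       (l.foldl pvStep (g, c)).2 = true) := by
  induction l generalizing g c with
  | nil => left; simp
  | cons x t ih =>
    rw [List.foldl_cons]
    by_cases h : x > g ∧ PySem.Int.mod x 2 = 1
    · have hs : pvStep (g, c) x = (x, true) := by unfold pvStep; rw [if_pos h]
      rw [hs]
      rcases ih x true with h1 | h1
      · right; rw [h1]; exact ⟨List.mem_cons_self .., h.2, rfl⟩
      · right; exact ⟨List.mem_cons_of_mem _ h1.1, h1.2.1, h1.2.2⟩
    · have hs : pvStep (g, c) x = (g, c) := by unfold pvStep; rw [if_neg h]
      rw [hs]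
      rcases ih g c with h1 | h1
      · left; exact h1
      · right; exact ⟨List.mem_cons_of_mem _ h1.1, h1.2⟩

-- if a candidate odd digit d is present (and no larger odd digit is), the fold gives (d, true)
theorem foldl_eq_of_best (l : List Int) (hb : ∀ r ∈ l, 0 ≤ r ∧ r < 10)
    (d : Int) (hd : d ∈ l) (hodd : PySem.Int.mod d 2 = 1)
    (hmax : ∀ r ∈ l, PySem.Int.mod r 2 = 1 → r ≤ d) :
    l.foldl pvStep (-1, false) = (d, true) := by
  have hge := foldl_fst_ge_odd l (-1) false d hd hodd
  rcases foldl_cases l (-1) false with h1 | h1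
  · rw [h1] at hge
    have : 0 ≤ d := (hb d hd).1
    simp at hge; omega
  · have hle := hmax _ h1.1 h1.2.1
    have : (l.foldl pvStep (-1, false)).1 = d := le_antisymm hle hge
    exact Prod.ext this h1.2.2

theorem odd_digit_cases (r : Int) (hb : 0 ≤ r ∧ r < 10)
    (hodd : PySem.Int.mod r 2 = 1) : r = 1 ∨ r = 3 ∨ r = 5 ∨ r = 7 ∨ r = 9 := by
  rw [PySem.Int.mod_eq_emod_of_pos (by omega)] at hodd
  omega

theorem mod_odd_lit : PySem.Int.mod 9 2 = 1 ∧ PySem.Int.mod 7 2 = 1 ∧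
    PySem.Int.mod 5 2 = 1 ∧ PySem.Int.mod 3 2 = 1 ∧ PySem.Int.mod 1 2 = 1 := by decide

-- ===== VERDICT (by name: the statement is the Claim_ definition above) =====
theorem gtln_spec : Claim_equal_gtln := by
  intro a _
  unfold Spec_gtln gtln gtln_alt
  by_cases ha : a ≤ 0
  · rw [gtlnLoop, dif_neg (by omega), if_pos ha]
  · rw [if_neg ha]
    rw [gtlnLoop_eq_foldl]
    have hb := pvDigits_bounds a
    obtain ⟨m9, m7, m5, m3, m1⟩ := mod_odd_lit
    set l := pvDigits a with hl
    have hmem : ∀ d : Int, hasDigit a d = decide (d ∈ l) := fun d => hasDigit_eq_mem a d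
    by_cases h9 : (9 : Int) ∈ l
    · rw [show ([9,7,5,3,1] : List Int).find? (fun d => hasDigit a d) = some 9 by
        simp [List.find?, hmem, h9]]
      exact foldl_eq_of_best l hb 9 h9 m9 (fun r hr _ => by have := hb r hr; omega)
    · by_cases h7 : (7 : Int) ∈ l
      · rw [show ([9,7,5,3,1] : List Int).find? (fun d => hasDigit a d) = some 7 by
          simp [List.find?, hmem, h9, h7]]
        refine foldl_eq_of_best l hb 7 h7 m7 (fun r hr ho => ?_)
        rcases odd_digit_cases r (hb r hr) ho with h | h | h | h | h <;> subst h <;> first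
          | omega | exact absurd hr h9
      · by_cases h5 : (5 : Int) ∈ l
        · rw [show ([9,7,5,3,1] : List Int).find? (fun d => hasDigit a d) = some 5 by
            simp [List.find?, hmem, h9, h7, h5]]
          refine foldl_eq_of_best l hb 5 h5 m5 (fun r hr ho => ?_)
          rcases odd_digit_cases r (hb r hr) ho with h | h | h | h | h <;> subst h <;> first
            | omega | exact absurd hr h9 | exact absurd hr h7
        · by_cases h3 : (3 : Int) ∈ l
          · rw [show ([9,7,5,3,1] : List Int).find? (fun d => hasDigit a d) = some 3 by
              simp [List.find?, hmem, h9, h7, h5, h3]]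
            refine foldl_eq_of_best l hb 3 h3 m3 (fun r hr ho => ?_)
            rcases odd_digit_cases r (hb r hr) ho with h | h | h | h | h <;> subst h <;> first
              | omega | exact absurd hr h9 | exact absurd hr h7 | exact absurd hr h5
          · by_cases h1 : (1 : Int) ∈ l
            · rw [show ([9,7,5,3,1] : List Int).find? (fun d => hasDigit a d) = some 1 by
                simp [List.find?, hmem, h9, h7, h5, h3, h1]]
              refine foldl_eq_of_best l hb 1 h1 m1 (fun r hr ho => ?_)
              rcases odd_digit_cases r (hb r hr) ho with h | h | h | h | h <;> subst h <;>
                first | omega | exact absurd hr h9 | exact absurd hr h7 | exact absurd hr h5 | exact absurd hr h3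
            · rw [show ([9,7,5,3,1] : List Int).find? (fun d => hasDigit a d) = none by
                simp [List.find?, hmem, h9, h7, h5, h3, h1]]
              rcases foldl_cases l (-1) false with h | h
              · exact h
              · exfalso
                rcases odd_digit_cases _ (hb _ h.1) h.2.1 with hh | hh | hh | hh | hh <;>
                  rw [hh] at h <;>
                  first | exact h9 h.1 | exact h7 h.1 | exact h5 h.1 | exact h3 h.1 | exact h1 h.1
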